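-- pv_equiv track=rewrite | github.com/SR2k/leetcode | second-round/1239.串联字符串的最大长度.py | word_2_int
-- ===== SOURCE A (Python) =====
-- def word_2_int(word: str) -> int:
--     l = 0
--     seen = set()
--     for char in word:
--         if char in seen:
--             return -1
--         seen.add(char)
--         l += 1 << (ord(char) - ord('a'))
--     return l
-- ===== SOURCE B (Python) =====
-- def word_2_int(word: str) -> int:
--     # Sort-then-scan: duplicates become adjacent after sorting, then sum the bits.
--     s = sorted(word)
--     for x, y in zip(s, s[1:]):
--         if x == y:
--             return -1
--     total = 0
--     for c in s:
--         total += 1 << (ord(c) - ord('a'))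
--     return total
-- ===== Notes on version B (the rewrite author's own statement) =====
-- stated objective: alternative
-- what changed: A detects duplicates incrementally with a hash set during one accumulation pass with early return; B uses a sort-based algorithm: it sorts the characters, detects duplicates as adjacent equal pairs in the sorted order, and then sums the bit values over the sorted list (addition is order-independent).
import Mathlib
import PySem

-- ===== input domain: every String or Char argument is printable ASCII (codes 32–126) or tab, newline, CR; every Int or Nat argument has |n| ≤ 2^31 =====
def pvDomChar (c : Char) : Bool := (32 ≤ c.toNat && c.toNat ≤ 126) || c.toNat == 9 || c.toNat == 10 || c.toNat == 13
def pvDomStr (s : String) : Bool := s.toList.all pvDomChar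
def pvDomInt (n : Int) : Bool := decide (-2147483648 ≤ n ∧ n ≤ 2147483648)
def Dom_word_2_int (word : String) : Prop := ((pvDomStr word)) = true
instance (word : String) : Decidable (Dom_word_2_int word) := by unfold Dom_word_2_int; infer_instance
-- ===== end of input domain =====

-- B replaces A's incremental seen-set pass by a sort-based algorithm: sort the characters,
-- detect duplicates as adjacent equal pairs of the sorted list, then sum the bit values over
-- the sorted list (objective: alternative). Equivalence is claimed on Pre_, where Python A
-- does not raise; '1 << (ord(c) - 97)' is ported with Nat subtraction (exact whenever the
-- shift executes inside Pre_, since there the character code is ≥ 97).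

-- ===== PORT A =====
def wordLoopA : List Char → Int → PySem.Set Char → Int
  | [], l, _ => l
  | c :: cs, l, seen =>
    if PySem.Set.contains seen c then -1
    else wordLoopA cs (l + 2 ^ (c.toNat - 97)) (PySem.Set.add seen c)

def word_2_int (word : String) : Int :=
  wordLoopA word.toList 0 PySem.Set.empty

-- ===== PORT B =====
-- the 'for x, y in zip(s, s[1:])' adjacent-equality scan
def hasAdjDup : List Char → Bool
  | [] => false
  | [_] => false
  | x :: y :: rest => x == y || hasAdjDup (y :: rest)

def word_2_int_alt (word : String) : Int :=
  let s := PySem.List.sorted word.toList (fun c => c) false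
  if hasAdjDup s then -1
  else s.foldl (fun m c => m + 2 ^ (c.toNat - 97)) 0

-- ===== PRECONDITION & SPEC =====
-- Pre_ excludes exactly the inputs on which Python A raises ValueError: those containing a
-- character with code below 97 (before lowercase letters) at a position whose prefix through
-- it is duplicate-free (the shift count ord(c) - 97 is negative there). A returns normally
-- on every other input.
def Pre_word_2_int (word : String) : Prop :=
  ∀ i < word.toList.length, (word.toList.take (i + 1)).Nodup → 97 ≤ (word.toList[i]!).toNat
instance (word : String) : Decidable (Pre_word_2_int word) := by unfold Pre_word_2_int; infer_instance

def pvWitness_word_2_int : String := "ab"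

def Spec_word_2_int (word : String) (out : Int) : Prop := out = word_2_int_alt word
instance (word : String) (out : Int) : Decidable (Spec_word_2_int word out) := by unfold Spec_word_2_int; infer_instance

-- ===== CLAIM (what is proved, stated in full; the proofs are below) =====
def Claim_equal_word_2_int : Prop := ∀ (word : String), Dom_word_2_int word → Pre_word_2_int word → Spec_word_2_int word (word_2_int word)

-- ===== LEMMAS AND PROOFS =====

-- A's loop on a duplicate-free suffix disjoint from 'seen' is the plain accumulation fold.
theorem wordLoopA_nodup (cs : List Char) :
    ∀ (l : Int) (seen : PySem.Set Char), cs.Nodup → (∀ c ∈ cs, c ∉ seen) →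
      wordLoopA cs l seen = cs.foldl (fun m c => m + 2 ^ (c.toNat - 97)) l := by
  induction cs with
  | nil => intro l seen _ _; rfl
  | cons c cs ih =>
    intro l seen hnd hdis
    have hc : c ∉ seen := hdis c (List.mem_cons_self)
    simp only [wordLoopA, List.foldl_cons]
    rw [if_neg (by simpa [PySem.Set.contains_iff] using hc)]
    exact ih _ _ (List.Nodup.of_cons hnd)
      (fun d hd => by
        simp only [PySem.Set.mem_add]
        rintro (h | rfl)
        · exact hdis d (List.mem_cons_of_mem _ hd) h
        · exact (List.nodup_cons.mp hnd).1 hd)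

-- If the suffix has a duplicate or meets 'seen', A's loop returns -1.
theorem wordLoopA_dup (cs : List Char) :
    ∀ (l : Int) (seen : PySem.Set Char), ¬(cs.Nodup ∧ ∀ c ∈ cs, c ∉ seen) →
      wordLoopA cs l seen = -1 := by
  induction cs with
  | nil => intro l seen h; exact absurd ⟨List.nodup_nil, by simp⟩ h
  | cons c cs ih =>
    intro l seen h
    simp only [wordLoopA]
    by_cases hc : PySem.Set.contains seen c
    · rw [if_pos hc]
    · rw [if_neg hc]
      have hc' : c ∉ seen := fun hm => hc ((PySem.Set.contains_iff _ _).mpr hm)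
      refine ih _ _ ?_
      rintro ⟨hnd, hdis⟩
      refine h ⟨List.nodup_cons.mpr ⟨fun hm => ?_, hnd⟩, fun d hd => ?_⟩
      · exact hdis c hm (by simp [PySem.Set.mem_add])
      · rcases List.mem_cons.mp hd with rfl | hd'
        · exact hc'
        · intro hm; exact hdis d hd' (by simp [PySem.Set.mem_add, hm])

-- an adjacent duplicate is a duplicate
theorem not_nodup_of_hasAdjDup : ∀ (l : List Char), hasAdjDup l = true → ¬ l.Nodup := by
  intro l
  induction l with
  | nil => intro h; simp [hasAdjDup] at h
  | cons x t ih =>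
    cases t with
    | nil => intro h; simp [hasAdjDup] at h
    | cons y rest =>
      intro h hnd
      simp only [hasAdjDup, Bool.or_eq_true, beq_iff_eq] at h
      rcases h with rfl | h
      · exact (List.nodup_cons.mp hnd).1 List.mem_cons_self
      · exact ih h (List.Nodup.of_cons hnd)

-- a (≤)-sorted list with no adjacent duplicate is duplicate-free
theorem nodup_of_sorted_no_adj : ∀ (l : List Char), l.Pairwise (· ≤ ·) →
    hasAdjDup l = false → l.Nodup := by
  intro l
  induction l with
  | nil => intro _ _; exact List.nodup_nil
  | cons x t ih =>
    cases t with
    | nil => intro _ _; simp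
    | cons y rest =>
      intro hp h
      simp only [hasAdjDup, Bool.or_eq_false_iff, beq_eq_false_iff_ne] at h
      have hxy : x ≤ y := (List.pairwise_cons.mp hp).1 y List.mem_cons_self
      have hyz : ∀ z ∈ rest, y ≤ z :=
        fun z hz => (List.pairwise_cons.mp (List.pairwise_cons.mp hp).2).1 z hz
      refine List.nodup_cons.mpr ⟨?_, ih (List.pairwise_cons.mp hp).2 h.2⟩
      intro hm
      rcases List.mem_cons.mp hm with rfl | hm'
      · exact h.1 rfl
      · have : x < y := lt_of_le_of_ne hxy h.1
        exact absurd (hyz x hm') (not_le.mpr this)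

-- the accumulation fold is the starting value plus the sum of bit values
theorem foldl_eq_add_sum (l : List Char) :
    ∀ (a : Int), l.foldl (fun m c => m + 2 ^ (c.toNat - 97)) a
      = a + (l.map (fun c => (2 : Int) ^ (c.toNat - 97))).sum := by
  induction l with
  | nil => intro a; simp
  | cons c t ih => intro a; simp [List.foldl_cons, ih]; ring

-- ===== VERDICT (by name: the statement is the Claim_ definition above) =====
theorem word_2_int_spec : Claim_equal_word_2_int := by
  intro word _ _
  unfold Spec_word_2_int word_2_int word_2_int_alt
  have hperm : (PySem.List.sorted word.toList (fun c => c) false).Perm word.toList :=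
    PySem.List.sorted_perm _ _ _
  by_cases hnd : word.toList.Nodup
  · rw [wordLoopA_nodup _ _ _ hnd (by simp [PySem.Set.empty])]
    have hsnd : (PySem.List.sorted word.toList (fun c => c) false).Nodup :=
      hperm.nodup_iff.mpr hnd
    have hadj : hasAdjDup (PySem.List.sorted word.toList (fun c => c) false) = false := by
      by_contra h
      exact not_nodup_of_hasAdjDup _ (by simpa using h) hsnd
    simp only [hadj, if_neg Bool.false_ne_true, foldl_eq_add_sum, zero_add]
    exact ((hperm.map _).sum_eq).symm
  · rw [wordLoopA_dup _ _ _ (by rintro ⟨h, _⟩; exact hnd h)]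
    have hadj : hasAdjDup (PySem.List.sorted word.toList (fun c => c) false) = true := by
      by_contra h
      have hp : (PySem.List.sorted word.toList (fun c => c) false).Pairwise (· ≤ ·) := by
        simpa using PySem.List.sorted_pairwise word.toList (fun c => c)
      have := nodup_of_sorted_no_adj _ hp (by simpa using h)
      exact hnd (hperm.nodup_iff.mp this)
    simp [hadj]
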